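-- pv_equiv track=rewrite | github.com/yena2bell/Statistical-control-approach-to-infer-the-reduction-in-NoPA_predicted | SCC_decomposition_module.py | _evaluate_SCC_inclusion
-- ===== SOURCE A (Python) =====
-- def _evaluate_SCC_inclusion(SCCs_cycle_form, new_SCC_cycle_form):
--     """
--     sub function of '_find_SCC_under_startnode'
--
--     'SCCs_cycle_form' contain information about node groups confirmed to be in the same SCC within flow_of_nodes.
--     Each 'SCC_cycle_form' is represented as a tuple in the form of (a, b), where a and b are integers such that a < b,
--     and they represent indices in flow_of_nodes. This means that the nodes from flow_of_nodes[a:b+1] belong to the same SCC.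
--
--     'SCCs_cycle_form' take the form of a list of tuples [(a, b), (c, d), ...]
--     where the indices satisfy a < b < c < d. Example: SCCs_cycle_form = [(3, 8), (11, 20), ...]
--
--     'new_SCC_cycle_form' represents newly discovered cycle information in flow_of_nodes.
--     When new_SCC is (x, y), the value of y satisfies b <= y for any existing SCC=(a, b) in SCCs.
--     If there is an overlap with an existing SCC, the two are merged into one.
--     """
--
--     for SCC_cycle_form in SCCs_cycle_form:
--         if SCC_cycle_form[1] < new_SCC_cycle_form[0]:
--             continue #tCycle has no common nodes with tNewCycle. so go to next cycle
--         else: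
--             position_of_SCC = SCCs_cycle_form.index(SCC_cycle_form)
--             if SCC_cycle_form[0] <= new_SCC_cycle_form[0]:#cycle[1] >= new_cycle[0]
--                 new_SCC_cycle_form = (SCC_cycle_form[0],new_SCC_cycle_form[1])
--             #else: cycle[1] >= new_cycle[0] and cycle[0]>new_cycle[0]
--             break
--     else:
--         #new cycle is not intersected to any of cycle in cycles
--         SCCs_cycle_form.append(new_SCC_cycle_form)
--         return SCCs_cycle_form
--
--     SCCs_cycle_form = SCCs_cycle_form[0:position_of_SCC]
--     SCCs_cycle_form.append(new_SCC_cycle_form)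
--     return SCCs_cycle_form
-- ===== SOURCE B (Python) =====
-- def _evaluate_SCC_inclusion(SCCs_cycle_form, new_SCC_cycle_form):
--     # Return-value equivalent re-implementation by structural recursion.
--     # (A appends to the input list in place in the no-overlap case; B never
--     # mutates its argument — the equivalence claimed is about the return value.)
--     if not SCCs_cycle_form:
--         return [new_SCC_cycle_form]
--     scc = SCCs_cycle_form[0]
--     if scc[1] < new_SCC_cycle_form[0]:
--         return [scc] + _evaluate_SCC_inclusion(SCCs_cycle_form[1:], new_SCC_cycle_form)
--     if scc[0] <= new_SCC_cycle_form[0]: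
--         return [(scc[0], new_SCC_cycle_form[1])]
--     return [new_SCC_cycle_form]
-- ===== Notes on version B (the rewrite author's own statement) =====
-- stated objective: simpler
-- what changed: Replaces A's for/else scan with its redundant list.index rescan, slicing and in-place append by a direct structural recursion that builds the result list front-to-back with no index bookkeeping (B does not mutate the input list; return values agree everywhere).
import Mathlib
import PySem

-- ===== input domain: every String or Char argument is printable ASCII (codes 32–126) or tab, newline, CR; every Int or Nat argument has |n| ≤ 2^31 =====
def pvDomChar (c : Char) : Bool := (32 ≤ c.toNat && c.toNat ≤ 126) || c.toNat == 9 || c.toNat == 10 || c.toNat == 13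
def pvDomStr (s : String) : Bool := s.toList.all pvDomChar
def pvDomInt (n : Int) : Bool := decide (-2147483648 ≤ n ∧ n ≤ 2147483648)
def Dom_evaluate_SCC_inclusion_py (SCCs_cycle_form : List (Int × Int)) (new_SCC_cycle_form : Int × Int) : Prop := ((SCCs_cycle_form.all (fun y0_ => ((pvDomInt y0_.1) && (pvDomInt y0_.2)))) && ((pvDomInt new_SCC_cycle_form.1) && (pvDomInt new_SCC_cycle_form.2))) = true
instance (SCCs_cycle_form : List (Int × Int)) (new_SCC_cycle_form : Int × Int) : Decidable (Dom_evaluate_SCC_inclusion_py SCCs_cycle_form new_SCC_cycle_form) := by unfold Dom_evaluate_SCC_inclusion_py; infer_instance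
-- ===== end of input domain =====

-- B replaces A's for/else scan + list.index rescan + slice/append by a direct structural
-- recursion (simpler; same O(n) cost). A appends to its input list in place in the
-- no-overlap case; B does not mutate — the equivalence proved is about the RETURN value.

-- ===== PORT A =====
-- The for-loop over SCCs_cycle_form: 'full' is the whole list (A re-reads it via .index
-- and slicing), 'rest' the elements not yet visited.
def pvALoop (full : List (Int × Int)) (rest : List (Int × Int)) (nw : Int × Int) : List (Int × Int) :=
  match rest with
  | [] => full ++ [nw]                      -- for-else branch: append and return
  | scc :: rest' =>
    if scc.2 < nw.1 then pvALoop full rest' nw   -- continue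
    else
      -- position_of_SCC = SCCs_cycle_form.index(SCC_cycle_form); scc ∈ full here, so
      -- index? is some; the .getD 0 default is unreachable (Python .index cannot raise here)
      let pos : Nat := (PySem.List.index? full scc).getD 0
      let nw' : Int × Int := if scc.1 ≤ nw.1 then (scc.1, nw.2) else nw
      (PySem.List.slice full (some 0) (some (pos : Int))) ++ [nw']

def evaluate_SCC_inclusion_py (SCCs_cycle_form : List (Int × Int)) (new_SCC_cycle_form : Int × Int) : List (Int × Int) :=
  pvALoop SCCs_cycle_form SCCs_cycle_form new_SCC_cycle_form

-- ===== PORT B =====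
def evaluate_SCC_inclusion_py_alt (SCCs_cycle_form : List (Int × Int)) (new_SCC_cycle_form : Int × Int) : List (Int × Int) :=
  match SCCs_cycle_form with
  | [] => [new_SCC_cycle_form]
  | scc :: rest =>
    if scc.2 < new_SCC_cycle_form.1 then
      [scc] ++ evaluate_SCC_inclusion_py_alt rest new_SCC_cycle_form
    else if scc.1 ≤ new_SCC_cycle_form.1 then
      [(scc.1, new_SCC_cycle_form.2)]
    else
      [new_SCC_cycle_form]

-- ===== PRECONDITION & SPEC =====
def Spec_evaluate_SCC_inclusion_py (SCCs_cycle_form : List (Int × Int)) (new_SCC_cycle_form : Int × Int) (out : List (Int × Int)) : Prop := out = evaluate_SCC_inclusion_py_alt SCCs_cycle_form new_SCC_cycle_form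
instance (SCCs_cycle_form : List (Int × Int)) (new_SCC_cycle_form : Int × Int) (out : List (Int × Int)) : Decidable (Spec_evaluate_SCC_inclusion_py SCCs_cycle_form new_SCC_cycle_form out) := by unfold Spec_evaluate_SCC_inclusion_py; infer_instance

-- ===== CLAIM (what is proved, stated in full; the proofs are below) =====
def Claim_equal_evaluate_SCC_inclusion_py : Prop := ∀ (SCCs_cycle_form : List (Int × Int)) (new_SCC_cycle_form : Int × Int), Dom_evaluate_SCC_inclusion_py SCCs_cycle_form new_SCC_cycle_form → Spec_evaluate_SCC_inclusion_py SCCs_cycle_form new_SCC_cycle_form (evaluate_SCC_inclusion_py SCCs_cycle_form new_SCC_cycle_form)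

-- ===== LEMMAS AND PROOFS =====

-- loop invariant: 'pre' is the already-skipped prefix, every skipped element has
-- second component < nw.1, and full = pre ++ rest
theorem pvALoop_eq_alt (pre rest : List (Int × Int)) (nw : Int × Int)
    (h : ∀ p ∈ pre, p.2 < nw.1) :
    pvALoop (pre ++ rest) rest nw = pre ++ evaluate_SCC_inclusion_py_alt rest nw := by
  induction rest generalizing pre with
  | nil => simp [pvALoop, evaluate_SCC_inclusion_py_alt]
  | cons scc rest' ih =>
    by_cases hlt : scc.2 < nw.1
    · have hpre : ∀ p ∈ pre ++ [scc], p.2 < nw.1 := by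
        intro p hp
        rcases List.mem_append.mp hp with h1 | h2
        · exact h p h1
        · simp at h2; subst h2; exact hlt
      have := ih (pre ++ [scc]) hpre
      simp only [pvALoop, hlt, if_pos, evaluate_SCC_inclusion_py_alt]
      simpa [List.append_assoc] using this
    · have hnotin : scc ∉ pre := by
        intro hmem; exact hlt (h scc hmem)
      have hidx : PySem.List.index? (pre ++ scc :: rest') scc = some pre.length := by
        rw [show pre ++ scc :: rest' = (pre ++ [scc]) ++ rest' by simp]
        rw [PySem.List.index?_append_of_mem _ (by simp)]
        exact PySem.List.index?_append_singleton_self pre scc hnotin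
      have hslice : PySem.List.slice (pre ++ scc :: rest') (some 0) (some ((pre.length : Nat) : Int)) = pre := by
        rw [PySem.List.slice_zero_start, PySem.List.slice_to_natCast]
        simp
      simp only [pvALoop, hlt, if_neg, not_false_iff, hidx, Option.getD_some,
        evaluate_SCC_inclusion_py_alt]
      rw [hslice]
      split_ifs <;> rfl

-- ===== VERDICT (by name: the statement is the Claim_ definition above) =====
theorem evaluate_SCC_inclusion_py_spec : Claim_equal_evaluate_SCC_inclusion_py := by
  intro l nw _
  unfold Spec_evaluate_SCC_inclusion_py evaluate_SCC_inclusion_py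
  simpa using pvALoop_eq_alt [] l nw (by intro p hp; simp at hp)
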